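-- pv_equiv track=rewrite | github.com/FlorianGD/adventofcode_2016 | day18.py | fill_rows
-- ===== SOURCE A (Python) =====
-- from itertools import starmap
--
-- def below_tile_type(left: str, center: str, right: str) -> str:
--     """
--     left, center and right are tiles in the above row. It is a trap iif
--     - Its left and center tiles are traps, but its right tile is not.
--     - Its center and right tiles are traps, but its left tile is not.
--     - Only its left tile is a trap.
--     - Only its right tile is a trap.
--     Trap is ^, safe is .
--     """
--     if left == "^" and center == "^" and right == ".":
--         return "^"
--     elif left == "." and center == "^" and right == "^":
--         return "^"
--     elif left == "^" and center == "." and right == ".":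
--         return "^"
--     elif left == "." and center == "." and right == "^":
--         return "^"
--     else:
--         return "."
--
-- def row_below(line: str) -> str:
--     """Computes the row below the given line."""
--     return "".join(starmap(below_tile_type, zip("." + line, line, line[1:] + ".")))
--
-- def fill_rows(fisrt_line: str, nrows: int = 40) -> str:
--     prev_row = fisrt_line
--     rows = fisrt_line + "\n"
--     for _ in range(nrows - 1):
--         row = row_below(prev_row)
--         prev_row = row
--         rows += row + "\n"
--     return rows
-- ===== SOURCE B (Python) =====
-- def fill_rows(fisrt_line: str, nrows: int = 40) -> str:
--     # Only the seed can contain arbitrary characters; every generated row is pure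
--     # '^'/'.' and there the rule is Rule 90 (trap iff the two upper neighbours
--     # differ), so derive the first row from the rule once, then iterate on an
--     # integer bitmask: next = ((row << 1) ^ (row >> 1)) & mask.
--     w = len(fisrt_line)
--     lines = [fisrt_line]
--     if nrows > 1:
--         p = '.' + fisrt_line + '.'
--         first = ''.join(
--             '^' if (p[i], p[i + 1], p[i + 2]) in
--                    (('^', '^', '.'), ('.', '^', '^'), ('^', '.', '.'), ('.', '.', '^'))
--             else '.'
--             for i in range(w))
--         lines.append(first)
--         row = 0
--         for c in reversed(first):
--             row = row << 1 | (c == '^')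
--         mask = (1 << w) - 1
--         for _ in range(nrows - 2):
--             row = ((row << 1) ^ (row >> 1)) & mask
--             lines.append(''.join('^' if row >> i & 1 else '.' for i in range(w)))
--     return '\n'.join(lines) + '\n'
-- ===== Notes on version B (the rewrite author's own statement) =====
-- stated objective: alternative
-- what changed: Replaces A's per-row zip of three shifted strings through a four-branch tile function by deriving the first row from the trap rule once and then iterating the Rule-90 integer-bitmask recurrence next = ((row<<1) ^ (row>>1)) & mask, rendering each integer back to text.
import Mathlib
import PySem

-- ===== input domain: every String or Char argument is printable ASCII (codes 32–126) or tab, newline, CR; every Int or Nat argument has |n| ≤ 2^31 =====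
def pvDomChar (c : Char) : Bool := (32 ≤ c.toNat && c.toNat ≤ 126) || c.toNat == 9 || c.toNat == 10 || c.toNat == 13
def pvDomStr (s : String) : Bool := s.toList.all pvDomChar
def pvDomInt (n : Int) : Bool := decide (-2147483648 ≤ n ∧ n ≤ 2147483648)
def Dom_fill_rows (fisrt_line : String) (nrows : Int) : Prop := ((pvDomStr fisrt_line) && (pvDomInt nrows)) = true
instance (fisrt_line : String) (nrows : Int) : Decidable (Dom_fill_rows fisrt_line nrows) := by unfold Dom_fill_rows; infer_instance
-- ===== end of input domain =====

-- B derives the first row from the trap rule once, then iterates Rule 90 on an integer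
-- bitmask (next = ((row<<1) ^ (row>>1)) & mask) instead of A's per-tile triple pattern match.

-- ===== PORT A =====
def belowTileType (left center right : Char) : Char :=
  if left = '^' ∧ center = '^' ∧ right = '.' then '^'
  else if left = '.' ∧ center = '^' ∧ right = '^' then '^'
  else if left = '^' ∧ center = '.' ∧ right = '.' then '^'
  else if left = '.' ∧ center = '.' ∧ right = '^' then '^'
  else '.'

-- "".join(starmap(below_tile_type, zip("." + line, line, line[1:] + ".")))
def rowBelow (line : List Char) : List Char :=
  (('.' :: line).zip (line.zip (line.drop 1 ++ ['.']))).map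
    (fun p => belowTileType p.1 p.2.1 p.2.2)

-- for _ in range(nrows - 1): row = row_below(prev_row); prev_row = row; rows += row + "\n"
def loopA : Nat → List Char → String → String
  | 0, _, rows => rows
  | n+1, prev, rows =>
      let row := rowBelow prev
      loopA n row (rows ++ String.ofList row ++ "\n")

def fill_rows (fisrt_line : String) (nrows : Int) : String :=
  loopA (nrows - 1).toNat fisrt_line.toList (fisrt_line ++ "\n")

-- ===== PORT B =====
-- first = ''.join('^' if (p[i], p[i+1], p[i+2]) in (...) else '.' for i in range(w))
-- (p[i+k] is always in range, so plain indexing with a default is exact here)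
def firstStr (cs : List Char) : List Char :=
  (List.range cs.length).map (fun i =>
    let p := '.' :: cs ++ ['.']
    if (p.getD i '.', p.getD (i+1) '.', p.getD (i+2) '.') ∈
        [('^','^','.'), ('.','^','^'), ('^','.','.'), ('.','.','^')] then '^' else '.')

-- for c in reversed(first): row = row << 1 | (c == '^')
def maskOf (cs : List Char) : Nat :=
  cs.foldr (fun c t => t <<< 1 ||| (if c = '^' then 1 else 0)) 0

-- row = ((row << 1) ^ (row >> 1)) & mask
def stepB (w t : Nat) : Nat :=
  ((t <<< 1) ^^^ (t >>> 1)) &&& ((1 <<< w) - 1)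

-- ''.join('^' if row >> i & 1 else '.' for i in range(w))
def renderB (w t : Nat) : List Char :=
  (List.range w).map (fun i => if t >>> i &&& 1 = 1 then '^' else '.')

-- the rows appended by 'for _ in range(nrows - 2)', in order
def linesB (w : Nat) : Nat → Nat → List String
  | 0, _ => []
  | n+1, t =>
      let t' := stepB w t
      String.ofList (renderB w t') :: linesB w n t'

def fill_rows_alt (fisrt_line : String) (nrows : Int) : String :=
  PySem.Str.join "\n"
    (if 1 < nrows then
      fisrt_line :: String.ofList (firstStr fisrt_line.toList)
        :: linesB fisrt_line.toList.length (nrows - 2).toNat (maskOf (firstStr fisrt_line.toList))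
    else [fisrt_line]) ++ "\n"

-- ===== PRECONDITION & SPEC =====
def Spec_fill_rows (fisrt_line : String) (nrows : Int) (out : String) : Prop := out = fill_rows_alt fisrt_line nrows
instance (fisrt_line : String) (nrows : Int) (out : String) : Decidable (Spec_fill_rows fisrt_line nrows out) := by unfold Spec_fill_rows; infer_instance

-- ===== CLAIM (what is proved, stated in full; the proofs are below) =====
def Claim_equal_fill_rows : Prop := ∀ (fisrt_line : String) (nrows : Int), Dom_fill_rows fisrt_line nrows → Spec_fill_rows fisrt_line nrows (fill_rows fisrt_line nrows)

-- ===== LEMMAS AND PROOFS =====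

theorem bit_aux (x b i : Nat) (hb : b ≤ 1) :
    (x <<< 1 ||| b).testBit i = (if i = 0 then decide (b = 1) else x.testBit (i-1)) := by
  interval_cases b <;>
    simp only [Nat.testBit_or, Nat.testBit_shiftLeft, Nat.zero_testBit,
      show (1:ℕ) = 2^0 from rfl, Nat.testBit_two_pow] <;>
    cases i <;> simp

theorem maskOf_testBit (cs : List Char) (i : Nat) :
    (maskOf cs).testBit i = decide (∃ h : i < cs.length, cs[i] = '^') := by
  induction cs generalizing i with
  | nil => simp [maskOf]
  | cons c cs ih =>
    have h : maskOf (c :: cs) = maskOf cs <<< 1 ||| (if c = '^' then 1 else 0) := rfl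
    rw [h, bit_aux _ _ _ (by split <;> simp)]
    cases i with
    | zero => split <;> simp_all
    | succ i => simp [ih]

theorem stepB_lt (w t : Nat) : stepB w t < 2 ^ w := by
  have h1 : (1:ℕ) <<< w = 2 ^ w := by simp [Nat.shiftLeft_eq]
  have h := Nat.and_le_right (n := (t <<< 1) ^^^ (t >>> 1)) (m := (1 <<< w) - 1)
  have hp : 0 < 2 ^ w := Nat.two_pow_pos w
  unfold stepB
  omega

theorem stepB_testBit (w t i : Nat) :
    (stepB w t).testBit i =
      (((!decide (i = 0) && t.testBit (i-1)) != t.testBit (i+1)) && decide (i < w)) := by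
  have h1 : (1:ℕ) <<< w = 2 ^ w := by simp [Nat.shiftLeft_eq]
  unfold stepB
  rw [h1]
  simp only [Nat.testBit_and, Nat.testBit_xor, Nat.testBit_shiftLeft,
    Nat.testBit_shiftRight, Nat.testBit_two_pow_sub_one]
  cases i with
  | zero => simp
  | succ i =>
    have e1 : (1 + (i + 1)) = i + 1 + 1 := by omega
    simp [e1]

theorem renderB_getElem (w t i : Nat) (h : i < w) :
    (renderB w t)[i]'(by simp [renderB]; omega) = if t.testBit i then '^' else '.' := by
  simp only [renderB, List.getElem_map, List.getElem_range]
  rw [Nat.and_one_is_mod, Nat.shiftRight_eq_div_pow, Nat.testBit_eq_decide_div_mod_eq]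
  split_ifs <;> simp_all

theorem renderB_length (w t : Nat) : (renderB w t).length = w := by simp [renderB]

theorem renderB_valid (w t : Nat) : ∀ c ∈ renderB w t, c = '^' ∨ c = '.' := by
  intro c hc
  simp only [renderB, List.mem_map] at hc
  obtain ⟨i, -, hi⟩ := hc
  split at hi
  · exact Or.inl hi.symm
  · exact Or.inr hi.symm

theorem maskOf_renderB (w t : Nat) (h : t < 2 ^ w) :
    maskOf (renderB w t) = t := by
  have hl := renderB_length w t
  have hg : ∀ i (hi : i < w), (renderB w t)[i]'(by omega) = if t.testBit i then '^' else '.' :=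
    fun i hi => renderB_getElem w t i hi
  have hhi : ∀ i, ¬ i < w → t.testBit i = false := by
    intro i hi
    apply Nat.testBit_eq_false_of_lt
    exact Nat.lt_of_lt_of_le h (Nat.pow_le_pow_right (by norm_num) (by omega))
  apply Nat.eq_of_testBit_eq
  intro i
  rw [maskOf_testBit]
  by_cases hi : i < w
  · have hi' : i < (renderB w t).length := by omega
    simp only [hi', exists_true_left, hg i hi]
    by_cases hb : t.testBit i <;> simp [hb]
  · simp [hl, hi, hhi i hi]

theorem btt_mem (l c r : Char) :
    belowTileType l c r =
      if (l, c, r) ∈ [('^','^','.'), ('.','^','^'), ('^','.','.'), ('.','.','^')]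
      then '^' else '.' := by
  unfold belowTileType
  by_cases h1 : l = '^' <;> by_cases h2 : l = '.' <;> by_cases h3 : c = '^' <;>
    by_cases h4 : c = '.' <;> by_cases h5 : r = '^' <;> by_cases h6 : r = '.' <;>
    simp_all [Prod.ext_iff]

theorem btt_valid (l c r : Char) (hl : l = '^' ∨ l = '.') (hc : c = '^' ∨ c = '.')
    (hr : r = '^' ∨ r = '.') :
    belowTileType l c r = if (decide (l = '^') != decide (r = '^')) then '^' else '.' := by
  unfold belowTileType
  rcases hl with rfl | rfl <;> rcases hc with rfl | rfl <;> rcases hr with rfl | rfl <;> simp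

theorem rowBelow_length (cs : List Char) : (rowBelow cs).length = cs.length := by
  cases cs <;> simp [rowBelow]

theorem rowBelow_getElem (cs : List Char) (i : Nat) (hi : i < (rowBelow cs).length) :
    (rowBelow cs)[i] =
      belowTileType (('.' :: cs)[i]'(by simp [rowBelow_length] at hi ⊢; omega))
        (cs[i]'(by simpa [rowBelow_length] using hi))
        ((cs.drop 1 ++ ['.'])[i]'(by simp [rowBelow_length] at hi ⊢; omega)) := by
  simp [rowBelow]

theorem firstStr_length (cs : List Char) : (firstStr cs).length = cs.length := by
  simp [firstStr]

theorem firstStr_valid (cs : List Char) : ∀ c ∈ firstStr cs, c = '^' ∨ c = '.' := by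
  intro c hc
  simp only [firstStr, List.mem_map] at hc
  obtain ⟨i, -, hi⟩ := hc
  split at hi
  · exact Or.inl hi.symm
  · exact Or.inr hi.symm

-- the first derived line, computed by B from the four patterns, is A's row_below
theorem rowBelow_eq_firstStr (cs : List Char) : rowBelow cs = firstStr cs := by
  apply List.ext_getElem
  · rw [rowBelow_length, firstStr_length]
  intro i hi1 hi2
  have hn : i < cs.length := by rw [rowBelow_length] at hi1; exact hi1
  rw [rowBelow_getElem cs i hi1, btt_mem]
  simp only [firstStr, List.getElem_map, List.getElem_range]
  have hlen : ('.' :: cs ++ ['.']).length = cs.length + 2 := by simp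
  have h0 : ('.' :: cs ++ ['.']).getD i '.' = ('.' :: cs)[i]'(by simp; omega) := by
    rw [List.getD_eq_getElem _ _ (by omega)]
    cases i with
    | zero => simp
    | succ j =>
      simp only [List.cons_append, List.getElem_cons_succ]
      rw [List.getElem_append_left (by omega)]
  have h1 : ('.' :: cs ++ ['.']).getD (i+1) '.' = cs[i]'hn := by
    rw [List.getD_eq_getElem _ _ (by omega)]
    simp only [List.cons_append, List.getElem_cons_succ]
    rw [List.getElem_append_left (by omega)]
  have h2 : ('.' :: cs ++ ['.']).getD (i+2) '.' = (cs.drop 1 ++ ['.'])[i]'(by simp; omega) := by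
    rw [List.getD_eq_getElem _ _ (by omega)]
    simp only [List.cons_append, List.getElem_cons_succ]
    by_cases h : i + 1 < cs.length
    · rw [List.getElem_append_left (by omega), List.getElem_append_left (by simp; omega)]
      simp
    · rw [List.getElem_append_right (by omega), List.getElem_append_right (by simp; omega)]
      simp [List.getElem_singleton]
  rw [h0, h1, h2]

-- a row that is already pure '^'/'.' steps exactly by the Rule-90 bitmask recurrence
theorem rowBelow_eq_render (cs : List Char) (hv : ∀ c ∈ cs, c = '^' ∨ c = '.') :
    rowBelow cs = renderB cs.length (stepB cs.length (maskOf cs)) := by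
  apply List.ext_getElem
  · rw [rowBelow_length, renderB_length]
  intro i hi1 hi2
  have hn : i < cs.length := by rw [rowBelow_length] at hi1; exact hi1
  rw [renderB_getElem _ _ i hn, stepB_testBit]
  rw [rowBelow_getElem cs i hi1]
  have hleft : ('.' :: cs)[i]'(by simp; omega) = if h : i = 0 then '.' else cs[i-1]'(by omega) := by
    cases i with
    | zero => simp
    | succ j => simp
  have hright : (cs.drop 1 ++ ['.'])[i]'(by simp; omega) =
      if h : i + 1 < cs.length then cs[i+1]'h else '.' := by
    by_cases h : i + 1 < cs.length
    · rw [List.getElem_append_left (by simp; omega)]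
      simp [h]
    · rw [List.getElem_append_right (by simp; omega)]
      simp [h]
  rw [hleft, hright]
  rw [btt_valid _ _ _
    (by split
        · right; rfl
        · exact hv _ (List.getElem_mem _))
    (hv _ (List.getElem_mem _))
    (by split
        · exact hv _ (List.getElem_mem _)
        · right; rfl)]
  rw [maskOf_testBit, maskOf_testBit]
  by_cases h0 : i = 0 <;> by_cases h1 : i + 1 < cs.length
  · subst h0
    simp [h1, hn]
  · subst h0
    simp [h1, hn]
  · have h1' : i - 1 < cs.length := by omega
    simp [h0, h1, h1', hn]
  · have h1' : i - 1 < cs.length := by omega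
    simp [h0, h1, h1', hn]

-- concatenation of the loop-emitted rows, each followed by "\n"
def glueNl : List String → String
  | [] => ""
  | l :: ls => l ++ "\n" ++ glueNl ls

theorem loopA_eq_glue (n : Nat) (cs : List Char) (rows : String)
    (hv : ∀ c ∈ cs, c = '^' ∨ c = '.') :
    loopA n cs rows = rows ++ glueNl (linesB cs.length n (maskOf cs)) := by
  induction n generalizing cs rows with
  | zero => simp [loopA, linesB, glueNl]
  | succ n ih =>
    show loopA n (rowBelow cs) (rows ++ String.ofList (rowBelow cs) ++ "\n") = _
    rw [rowBelow_eq_render cs hv]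
    rw [ih _ _ (renderB_valid _ _)]
    rw [renderB_length, maskOf_renderB _ _ (stepB_lt cs.length (maskOf cs))]
    show _ = rows ++ glueNl (String.ofList (renderB cs.length (stepB cs.length (maskOf cs)))
        :: linesB cs.length n (stepB cs.length (maskOf cs)))
    simp [glueNl, String.append_assoc]

theorem join_glue (ls : List String) (s : String) :
    PySem.Str.join "\n" (s :: ls) ++ "\n" = s ++ "\n" ++ glueNl ls := by
  induction ls generalizing s with
  | nil =>
    apply String.toList_injective
    simp [PySem.Str.toList_join, PySem.Chars.join, glueNl, List.intercalate]
  | cons l ls ih =>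
    have h : PySem.Str.join "\n" (s :: l :: ls) = s ++ "\n" ++ PySem.Str.join "\n" (l :: ls) := by
      apply String.toList_injective
      simp [PySem.Str.toList_join, PySem.Chars.join, List.intercalate]
    rw [h]
    simp only [String.append_assoc]
    rw [ih l]
    simp [glueNl, String.append_assoc]

-- ===== VERDICT (by name: the statement is the Claim_ definition above) =====
theorem fill_rows_spec : Claim_equal_fill_rows := by
  intro s n _
  unfold Spec_fill_rows fill_rows fill_rows_alt
  by_cases hn : 1 < n
  · have hm : (n - 1).toNat = (n - 2).toNat + 1 := by omega
    rw [hm, if_pos hn]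
    show loopA (n-2).toNat (rowBelow s.toList)
        ((s ++ "\n") ++ String.ofList (rowBelow s.toList) ++ "\n") = _
    rw [rowBelow_eq_firstStr]
    rw [loopA_eq_glue _ _ _ (firstStr_valid s.toList), firstStr_length, join_glue]
    simp [glueNl, String.append_assoc]
  · have hm : (n - 1).toNat = 0 := by omega
    rw [hm, if_neg hn]
    show (s ++ "\n") = _
    rw [join_glue]
    simp [glueNl]
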